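-- pv_equiv track=rewrite | github.com/caitaozhan/LeetCode | backtracking/282.expression-add-operators.py | check
-- ===== SOURCE A (Python) =====
-- def check(s: str) -> bool:
--     if s[0] == '0':
--         if 1 < len(s) and s[1].isdigit():
--             return False
--     for i in range(1, len(s)-1):
--         if s[i] == '0':
--             if s[i+1].isdigit() and s[i-1].isdigit() is False:
--                 return False
--     return True
-- ===== SOURCE B (Python) =====
-- def check(s: str) -> bool:
--     i, n = 0, len(s)
--     while i < n:
--         if s[i].isdigit():
--             j = i
--             while j < n and s[j].isdigit():
--                 j += 1
--             if j - i > 1 and s[i] == '0':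
--                 return False
--             i = j
--         else:
--             i += 1
--     return True
-- ===== Notes on version B (the rewrite author's own statement) =====
-- stated objective: alternative
-- what changed: B scans the string once into maximal runs of isdigit() characters and rejects exactly the runs of length > 1 that start with '0', instead of A's index-based triple test (s[i-1], s[i], s[i+1]) over every interior position plus a separate special case for index 0.
import Mathlib
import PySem

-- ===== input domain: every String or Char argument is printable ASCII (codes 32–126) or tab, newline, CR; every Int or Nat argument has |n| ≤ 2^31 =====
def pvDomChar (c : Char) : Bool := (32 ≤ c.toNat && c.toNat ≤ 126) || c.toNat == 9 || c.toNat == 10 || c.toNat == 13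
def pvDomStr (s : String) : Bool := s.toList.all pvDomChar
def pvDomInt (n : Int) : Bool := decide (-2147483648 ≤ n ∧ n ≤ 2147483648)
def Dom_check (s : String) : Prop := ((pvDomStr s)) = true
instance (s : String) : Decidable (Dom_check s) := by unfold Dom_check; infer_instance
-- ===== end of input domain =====

-- B re-implements the leading-zero check as a single scan over maximal digit runs
-- (alternative decomposition, same O(n) cost); equivalence of RETURN values on nonempty strings.

-- ===== PORT A =====
def check (s : String) : Bool :=
  if PySem.List.pyGetD s.toList 0 ' ' = '0' ∧
     (1 < (s.toList.length : Int) ∧ PySem.Chars.isdigit (PySem.List.pyGetD s.toList 1 ' ') = true) then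
    false
  else
    (PySem.List.pyRange 1 ((s.toList.length : Int) - 1) 1).all (fun i =>
      !(PySem.List.pyGetD s.toList i ' ' = '0' &&
        PySem.Chars.isdigit (PySem.List.pyGetD s.toList (i + 1) ' ') &&
        !PySem.Chars.isdigit (PySem.List.pyGetD s.toList (i - 1) ' ')))

-- ===== PORT B =====
-- run scan: on a digit, take the whole maximal digit run; reject a run of length > 1 starting '0'
def checkAltGo : List Char → Bool
  | [] => true
  | c :: rest =>
    if PySem.Chars.isdigit c then
      if rest.takeWhile PySem.Chars.isdigit ≠ [] ∧ c = '0' then false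
      else checkAltGo (rest.dropWhile PySem.Chars.isdigit)
    else checkAltGo rest
termination_by cs => cs.length
decreasing_by
  · exact Nat.lt_succ_of_le (List.length_dropWhile_le _ _)
  · simp

def check_alt (s : String) : Bool := checkAltGo s.toList

-- ===== PRECONDITION & SPEC =====
-- Pre_ excludes only the empty string, on which A raises IndexError reading s[0].
def Pre_check (s : String) : Prop := s ≠ ""
instance (s : String) : Decidable (Pre_check s) := by unfold Pre_check; infer_instance
def pvWitness_check : String := "a01"

def Spec_check (s : String) (out : Bool) : Prop := out = check_alt s
instance (s : String) (out : Bool) : Decidable (Spec_check s out) := by unfold Spec_check; infer_instance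

-- ===== CLAIM (what is proved, stated in full; the proofs are below) =====
def Claim_equal_check : Prop := ∀ (s : String), Dom_check s → Pre_check s → Spec_check s (check s)

-- ===== LEMMAS AND PROOFS =====

-- middle abstraction: char-by-char scan carrying "previous char is a digit"
def headDigit : List Char → Bool
  | [] => false
  | d :: _ => PySem.Chars.isdigit d

def good (prev : Bool) : List Char → Bool
  | [] => true
  | c :: rest =>
    if prev = false ∧ c = '0' ∧ headDigit rest = true then false
    else good (PySem.Chars.isdigit c) rest

-- the interior-index loop of A as a structural triple scan
def triple : List Char → Bool
  | p :: z :: d :: rest =>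
    (!(z = '0' && PySem.Chars.isdigit d && !PySem.Chars.isdigit p)) && triple (z :: d :: rest)
  | _ => true

lemma isdigit_zero_char : PySem.Chars.isdigit '0' = true := by decide

lemma good_indep (l : List Char) (h : headDigit l = false) (p q : Bool) :
    good p l = good q l := by
  cases l with
  | nil => rfl
  | cons d rest =>
    simp only [headDigit] at h
    simp only [good]
    have : ¬ (d = '0') := by
      intro hd; rw [hd] at h; simp [isdigit_zero_char] at h
    simp [this]

lemma good_run (run tail : List Char) (h : ∀ c ∈ run, PySem.Chars.isdigit c = true) :
    good true (run ++ tail) = good true tail := by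
  induction run with
  | nil => rfl
  | cons c run' ih =>
    have hc : PySem.Chars.isdigit c = true := h c (by simp)
    rw [List.cons_append, good, if_neg (by rintro ⟨h1, -⟩; cases h1), hc]
    exact ih (fun c hc => h c (by simp [hc]))

lemma altGo_eq_good : ∀ (cs : List Char), checkAltGo cs = good false cs := by
  intro cs
  induction cs using checkAltGo.induct with
  | case1 => rw [checkAltGo]; rfl
  | case2 c rest hdig hviol =>
    -- digit c, violating run: both false
    obtain ⟨htw, hz⟩ := hviol
    have hhd : headDigit rest = true := by
      cases rest with
      | nil => simp at htw
      | cons d r =>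
        simp only [headDigit]
        by_cases h : PySem.Chars.isdigit d
        · exact h
        · simp [List.takeWhile, h] at htw
    rw [checkAltGo, if_pos hdig, if_pos ⟨htw, hz⟩, good, if_pos ⟨rfl, hz, hhd⟩]
  | case3 c rest hdig hviol ih =>
    -- digit c, no violation: step over the run
    rw [checkAltGo, if_pos hdig, if_neg hviol]
    have hcond : ¬ ((false : Bool) = false ∧ c = '0' ∧ headDigit rest = true) := by
      rintro ⟨-, hz, hhd⟩
      apply hviol
      refine ⟨?_, hz⟩
      cases rest with
      | nil => simp [headDigit] at hhd
      | cons d r =>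
        simp only [headDigit] at hhd
        simp [List.takeWhile, hhd]
    rw [good, if_neg hcond, hdig]
    have hdw : headDigit (rest.dropWhile PySem.Chars.isdigit) = false := by
      cases hh : rest.dropWhile PySem.Chars.isdigit with
      | nil => rfl
      | cons d r =>
        simp only [headDigit]
        have := List.head?_dropWhile_not PySem.Chars.isdigit rest
        rw [hh] at this
        simpa using this
    have key : good true rest = good false (rest.dropWhile PySem.Chars.isdigit) := by
      conv_lhs => rw [← List.takeWhile_append_dropWhile (p := PySem.Chars.isdigit) (l := rest)]
      rw [good_run _ _ (fun c hc => List.mem_takeWhile_imp hc),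
          good_indep _ hdw true false]
    rw [ih]
    exact key.symm
  | case4 c rest hdig ih =>
    rw [checkAltGo, if_neg hdig]
    have hdigb : PySem.Chars.isdigit c = false := by simpa using hdig
    have hcond : ¬ ((false : Bool) = false ∧ c = '0' ∧ headDigit rest = true) := by
      rintro ⟨-, hz, -⟩
      rw [hz] at hdigb; simp [isdigit_zero_char] at hdigb
    rw [good, if_neg hcond, hdigb, ih]

-- Nat-indexed form of A's loop body (k is the index of the left neighbour)
def natBody (cs : List Char) (k : Nat) : Bool :=
  !(cs.getD (k + 1) ' ' = '0' &&
    PySem.Chars.isdigit (cs.getD (k + 2) ' ') &&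
    !PySem.Chars.isdigit (cs.getD k ' '))

lemma aloop_eq_natRange (cs : List Char) :
    ((PySem.List.pyRange 1 ((cs.length : Int) - 1) 1).all (fun i =>
      !(PySem.List.pyGetD cs i ' ' = '0' &&
        PySem.Chars.isdigit (PySem.List.pyGetD cs (i + 1) ' ') &&
        !PySem.Chars.isdigit (PySem.List.pyGetD cs (i - 1) ' '))))
    = (List.range (cs.length - 2)).all (natBody cs) := by
  rw [PySem.List.pyRange_one, List.all_map]
  have hlen : ((cs.length : Int) - 1 - 1).toNat = cs.length - 2 := by omega
  rw [hlen]
  congr 1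
  funext k
  have h1 : (1 : Int) + (k : Int) = ((k + 1 : Nat) : Int) := by push_cast; ring
  have h2 : (1 : Int) + (k : Int) + 1 = ((k + 2 : Nat) : Int) := by push_cast; ring
  have h3 : (1 : Int) + (k : Int) - 1 = ((k : Nat) : Int) := by push_cast; ring
  simp only [Function.comp_apply]
  rw [h2, h3, h1]
  simp only [PySem.List.pyGetD_natCast, natBody]

lemma natRange_eq_triple : ∀ (cs : List Char),
    (List.range (cs.length - 2)).all (natBody cs) = triple cs := by
  intro cs
  induction cs with
  | nil => simp [triple]
  | cons p tl ih =>
    cases tl with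
    | nil => simp [triple]
    | cons z tl2 =>
      cases tl2 with
      | nil => simp [triple]
      | cons d rest =>
        have hlen : (p :: z :: d :: rest).length - 2 = rest.length + 1 := by
          simp only [List.length_cons]; omega
        rw [hlen, List.range_succ_eq_map, List.all_cons, List.all_map]
        have hhead : natBody (p :: z :: d :: rest) 0
            = !(z = '0' && PySem.Chars.isdigit d && !PySem.Chars.isdigit p) := by
          simp [natBody]
        have htl : (z :: d :: rest).length - 2 = rest.length := by
          simp only [List.length_cons]; omega
        rw [htl] at ih
        rw [hhead, triple, ← ih]
        congr 1

lemma triple_eq_good : ∀ (t : List Char) (a : Char),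
    triple (a :: t) = good (PySem.Chars.isdigit a) t := by
  intro t
  induction t with
  | nil => intro a; simp [triple, good]
  | cons z t' ih =>
    intro a
    cases t' with
    | nil =>
      simp [triple, good, headDigit]
    | cons d rest =>
      rw [triple, good, ih z]
      by_cases hcond : PySem.Chars.isdigit a = false ∧ z = '0' ∧ headDigit (d :: rest) = true
      · obtain ⟨ha, hz, hhd⟩ := hcond
        rw [if_pos ⟨ha, hz, hhd⟩]
        have hd : PySem.Chars.isdigit d = true := by simpa [headDigit] using hhd
        rw [hz, hd]
        simp [ha]
      · rw [if_neg (by exact fun h => hcond h)]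
        have : (!(z = '0' && PySem.Chars.isdigit d && !PySem.Chars.isdigit a)) = true := by
          simp only [headDigit] at hcond
          by_cases h1 : z = '0' <;> by_cases h2 : PySem.Chars.isdigit d
            <;> by_cases h3 : PySem.Chars.isdigit a <;> simp_all
        rw [this, Bool.true_and]

-- ===== VERDICT (by name: the statement is the Claim_ definition above) =====
theorem check_spec : Claim_equal_check := by
  unfold Claim_equal_check
  intro s _ hpre
  unfold Spec_check check check_alt
  rw [altGo_eq_good]
  cases hcs : s.toList with
  | nil =>
    exact absurd (String.toList_inj.mp (by rw [hcs]; rfl)) hpre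
  | cons a t =>
    rw [aloop_eq_natRange, natRange_eq_triple, triple_eq_good]
    have hget0 : PySem.List.pyGetD (a :: t) 0 ' ' = a := by
      simp [PySem.List.pyGetD_zero_cons]
    have hC0 : (PySem.List.pyGetD (a :: t) 0 ' ' = '0' ∧
        (1 < ((a :: t).length : Int) ∧
          PySem.Chars.isdigit (PySem.List.pyGetD (a :: t) 1 ' ') = true))
        ↔ (a = '0' ∧ headDigit t = true) := by
      rw [hget0]
      cases t with
      | nil => simp [headDigit]
      | cons d r =>
        have : PySem.List.pyGetD (a :: d :: r) 1 ' ' = d := by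
          have := PySem.List.pyGetD_natCast (a :: d :: r) 1 ' '
          simpa using this
        simp only [this, headDigit]
        constructor
        · rintro ⟨h1, -, h3⟩; exact ⟨h1, h3⟩
        · rintro ⟨h1, h3⟩
          refine ⟨h1, by simp only [List.length_cons]; omega, h3⟩
    by_cases hc : a = '0' ∧ headDigit t = true
    · rw [if_pos (hC0.mpr hc), good, if_pos ⟨rfl, hc⟩]
    · rw [if_neg (fun h => hc (hC0.mp h)), good, if_neg (fun h => hc ⟨h.2.1, h.2.2⟩)]
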